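-- pv_equiv track=rewrite | github.com/karl21-02/ora-automation | src/ora_rd_orchestrator/config.py | _normalize_services
-- ===== SOURCE A (Python) =====
-- from typing import Iterable
--
-- def _normalize_text_token(value: str) -> str:
--     return value.strip().lower().replace("-", "")
--
-- def _normalize_services(value: Iterable[str] | None, fallback: set[str] | None = None) -> list[str]:
--     if not value:
--         return sorted(set(fallback or set()))
--     normalized: set[str] = set()
--     for item in value:
--         key = _normalize_text_token(str(item))
--         if key:
--             normalized.add(key)
--     return sorted(normalized)
-- ===== SOURCE B (Python) =====
-- def _merge_unique(xs, ys):
--     # merge two sorted duplicate-free lists, dropping duplicates as they meet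
--     out = []
--     i = j = 0
--     while i < len(xs) and j < len(ys):
--         a, b = xs[i], ys[j]
--         if a < b:
--             out.append(a)
--             i += 1
--         elif b < a:
--             out.append(b)
--             j += 1
--         else:
--             out.append(a)
--             i += 1
--             j += 1
--     out.extend(xs[i:])
--     out.extend(ys[j:])
--     return out
--
--
-- def _sort_unique(keys):
--     # merge sort that removes duplicates during each merge
--     if len(keys) <= 1:
--         return list(keys)
--     mid = len(keys) // 2
--     return _merge_unique(_sort_unique(keys[:mid]), _sort_unique(keys[mid:]))
--
--
-- def _normalize_services(value, fallback=None):
--     if not value: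
--         return _sort_unique(list(fallback or ()))
--     keys = [str(item).strip().lower().replace("-", "") for item in value]
--     return _sort_unique([k for k in keys if k])
-- ===== Notes on version B (the rewrite author's own statement) =====
-- stated objective: alternative
-- what changed: Replaces the hash-set-then-library-sort pipeline with a hand-written divide-and-conquer merge sort whose merge step eliminates duplicates as equal heads meet, so neither a set nor a sort call is used.
import Mathlib
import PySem

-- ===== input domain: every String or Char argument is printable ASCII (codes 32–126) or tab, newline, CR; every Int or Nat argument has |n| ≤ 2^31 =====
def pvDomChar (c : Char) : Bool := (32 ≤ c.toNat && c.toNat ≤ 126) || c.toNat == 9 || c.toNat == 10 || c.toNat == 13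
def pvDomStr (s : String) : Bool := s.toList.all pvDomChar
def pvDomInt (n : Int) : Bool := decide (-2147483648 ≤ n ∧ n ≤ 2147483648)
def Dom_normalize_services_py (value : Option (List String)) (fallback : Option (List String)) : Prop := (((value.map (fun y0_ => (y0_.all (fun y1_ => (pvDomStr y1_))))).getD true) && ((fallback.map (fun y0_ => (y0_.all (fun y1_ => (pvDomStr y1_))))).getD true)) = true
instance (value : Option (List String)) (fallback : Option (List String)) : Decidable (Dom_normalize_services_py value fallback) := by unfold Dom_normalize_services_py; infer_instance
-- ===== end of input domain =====

-- B replaces the hash-set+library-sort pipeline with a hand-written merge sort that drops duplicates during merge; same results, alternative algorithm.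


-- ===== PORT A =====
-- _normalize_text_token
def pvNormTokA (s : String) : String :=
  PySem.Str.replace (PySem.Str.lower (PySem.Str.strip s)) "-" ""

def normalize_services_py (value : Option (List String)) (fallback : Option (List String)) : List String :=
  -- 'if not value' : value is None or the empty list
  if value.getD [] = [] then
    -- sorted(set(fallback or set()))
    PySem.List.sorted (PySem.Set.ofList (fallback.getD [])) (fun x => x) false
  else
    -- normalized = set(); for item in value: key = _normalize_text_token(str(item)); if key: normalized.add(key)
    let normalized : PySem.Set String :=
      (value.getD []).foldl (fun s item =>
        let key := pvNormTokA item
        if key ≠ "" then PySem.Set.add s key else s) PySem.Set.empty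
    PySem.List.sorted normalized (fun x => x) false

-- ===== PORT B =====
def pvNormTokB (s : String) : String :=
  PySem.Str.replace (PySem.Str.lower (PySem.Str.strip s)) "-" ""

-- _merge_unique: the two-index merge loop, as structural recursion on the two lists
-- (out.append(head of the smaller side); when heads are equal, append once and advance both)
def pvMergeU : List String → List String → List String
  | [], ys => ys
  | x :: xs, [] => x :: xs
  | a :: xs, b :: ys =>
    if a < b then a :: pvMergeU xs (b :: ys)
    else if b < a then b :: pvMergeU (a :: xs) ys
    else a :: pvMergeU xs ys
termination_by xs ys => xs.length + ys.length
decreasing_by all_goals (simp only [List.length_cons]; omega)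

-- _sort_unique: mid = len(keys)//2; merge the two recursively sorted halves
def pvSortU (keys : List String) : List String :=
  if keys.length ≤ 1 then keys
  else
    let mid := keys.length / 2
    pvMergeU (pvSortU (keys.take mid)) (pvSortU (keys.drop mid))
termination_by keys.length
decreasing_by all_goals (simp [List.length_take, List.length_drop]; omega)

def normalize_services_py_alt (value : Option (List String)) (fallback : Option (List String)) : List String :=
  if value.getD [] = [] then
    pvSortU (fallback.getD [])
  else
    -- keys = [normalize(item) for item in value]; _sort_unique([k for k in keys if k])
    pvSortU (((value.getD []).map pvNormTokB).filter (fun t => t ≠ ""))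

-- ===== PRECONDITION & SPEC =====
def Spec_normalize_services_py (value : Option (List String)) (fallback : Option (List String)) (out : List String) : Prop := out = normalize_services_py_alt value fallback
instance (value : Option (List String)) (fallback : Option (List String)) (out : List String) : Decidable (Spec_normalize_services_py value fallback out) := by unfold Spec_normalize_services_py; infer_instance

-- ===== CLAIM (what is proved, stated in full; the proofs are below) =====
def Claim_equal_normalize_services_py : Prop := ∀ (value : Option (List String)) (fallback : Option (List String)), Dom_normalize_services_py value fallback → Spec_normalize_services_py value fallback (normalize_services_py value fallback)

-- ===== LEMMAS AND PROOFS =====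

theorem pvMergeU_mem (xs ys : List String) (x : String) :
    x ∈ pvMergeU xs ys ↔ x ∈ xs ∨ x ∈ ys := by
  induction xs, ys using pvMergeU.induct with
  | case1 ys => simp [pvMergeU]
  | case2 x xs => simp [pvMergeU]
  | case3 a xs b ys h ih =>
    rw [pvMergeU, if_pos h]
    simp only [List.mem_cons, ih]; tauto
  | case4 a xs b ys h1 h2 ih =>
    rw [pvMergeU, if_neg h1, if_pos h2]
    simp only [List.mem_cons, ih]; tauto
  | case5 a xs b ys h1 h2 ih =>
    have hab : a = b := le_antisymm (not_lt.mp h2) (not_lt.mp h1)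
    rw [pvMergeU, if_neg h1, if_neg h2]
    simp only [List.mem_cons, ih, hab]; tauto

theorem pvMergeU_pairwise : ∀ (xs ys : List String), xs.Pairwise (· < ·) → ys.Pairwise (· < ·) →
    (pvMergeU xs ys).Pairwise (· < ·) := by
  intro xs ys
  induction xs, ys using pvMergeU.induct with
  | case1 ys => intro _ h; simpa [pvMergeU] using h
  | case2 x xs => intro h _; simpa [pvMergeU] using h
  | case3 a xs b ys h ih =>
    intro hx hy
    rcases List.pairwise_cons.1 hx with ⟨ha, hx'⟩
    rw [pvMergeU, if_pos h]
    refine List.pairwise_cons.2 ⟨?_, ih hx' hy⟩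
    intro y hy'
    rcases (pvMergeU_mem _ _ y).1 hy' with hm | hm
    · exact ha y hm
    · rcases List.mem_cons.1 hm with rfl | hm
      · exact h
      · exact lt_trans h ((List.pairwise_cons.1 hy).1 y hm)
  | case4 a xs b ys h1 h2 ih =>
    intro hx hy
    rcases List.pairwise_cons.1 hy with ⟨hb, hy'⟩
    rw [pvMergeU, if_neg h1, if_pos h2]
    refine List.pairwise_cons.2 ⟨?_, ih hx hy'⟩
    intro y hy''
    rcases (pvMergeU_mem _ _ y).1 hy'' with hm | hm
    · rcases List.mem_cons.1 hm with rfl | hm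
      · exact h2
      · exact lt_trans h2 ((List.pairwise_cons.1 hx).1 y hm)
    · exact hb y hm
  | case5 a xs b ys h1 h2 ih =>
    intro hx hy
    have hab : a = b := le_antisymm (not_lt.mp h2) (not_lt.mp h1)
    rcases List.pairwise_cons.1 hx with ⟨ha, hx'⟩
    rcases List.pairwise_cons.1 hy with ⟨hb, hy'⟩
    rw [pvMergeU, if_neg h1, if_neg h2]
    refine List.pairwise_cons.2 ⟨?_, ih hx' hy'⟩
    intro y hy''
    rcases (pvMergeU_mem _ _ y).1 hy'' with hm | hm
    · exact ha y hm
    · exact hab ▸ hb y hm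

-- pvSortU returns a strictly increasing list with the same members
theorem pvSortU_props : ∀ (keys : List String),
    (pvSortU keys).Pairwise (· < ·) ∧ (∀ x, x ∈ pvSortU keys ↔ x ∈ keys) := by
  intro keys
  induction keys using pvSortU.induct with
  | case1 keys h =>
    rw [pvSortU, if_pos h]
    refine ⟨?_, fun x => Iff.rfl⟩
    match keys, h with
    | [], _ => exact List.Pairwise.nil
    | [a], _ => exact List.pairwise_singleton _ _
  | case2 keys h mid ih1 ih2 =>
    rw [pvSortU, if_neg h]
    obtain ⟨hp1, hm1⟩ := ih1
    obtain ⟨hp2, hm2⟩ := ih2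
    refine ⟨pvMergeU_pairwise _ _ hp1 hp2, fun x => ?_⟩
    rw [pvMergeU_mem, hm1, hm2]
    conv_rhs => rw [← List.take_append_drop mid keys, List.mem_append]

-- sorted(set(keys)) is exactly B's duplicate-removing merge sort
theorem pv_sortU_eq (keys : List String) :
    PySem.List.sorted (PySem.Set.ofList keys) (fun x => x) false = pvSortU keys := by
  obtain ⟨hpw, hmem⟩ := pvSortU_props keys
  apply PySem.List.sorted_eq_of_perm_of_pairwise_lt
  · refine (List.perm_ext_iff_of_nodup (hpw.imp (fun h => ne_of_lt h)) (PySem.Set.nodup_ofList keys)).2 ?_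
    intro x
    rw [hmem x]
    simp [PySem.Set.mem_ofList]
  · simpa using hpw

-- A's accumulation loop is set(filtered normalized tokens)
theorem pv_loopA (vs : List String) : ∀ (s : PySem.Set String),
    vs.foldl (fun s item =>
        let key := pvNormTokA item
        if key ≠ "" then PySem.Set.add s key else s) s
      = ((vs.map pvNormTokA).filter (fun t => t ≠ "")).foldl PySem.Set.add s := by
  induction vs with
  | nil => intro s; simp only [List.foldl_nil, List.map_nil, List.filter_nil]
  | cons v t ih =>
    intro s
    rw [List.foldl_cons, List.map_cons, List.filter_cons]
    by_cases hk : pvNormTokA v = ""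
    · simp only [hk, ne_eq, not_true_eq_false, if_false, decide_false]
      exact ih _
    · simp only [ne_eq, hk, not_false_eq_true, if_true, decide_true]
      exact ih _

-- ===== VERDICT (by name: the statement is the Claim_ definition above) =====
theorem normalize_services_py_spec : Claim_equal_normalize_services_py := by
  intro value fallback _
  unfold Spec_normalize_services_py normalize_services_py normalize_services_py_alt
  by_cases h : value.getD [] = []
  · rw [if_pos h, if_pos h]; exact pv_sortU_eq _
  · rw [if_neg h, if_neg h, pv_loopA,
      show (PySem.Set.empty : PySem.Set String) = ([] : List String) from rfl,
      ← PySem.Set.ofList_eq_foldl,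
      show pvNormTokB = pvNormTokA from rfl]
    exact pv_sortU_eq _
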